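-- pv_equiv track=rewrite | github.com/sequenzia/challenges | google_foobar/05_01_Expanding_Nebula/solution.py | solution
-- ===== SOURCE A (Python) =====
-- from collections import defaultdict
--
-- def gen_bit_map(a_val,b_val,bit_len):
--     a_bit_val = a_val & ~(1<<bit_len)
--     b_bit_val = b_val & ~(1<<bit_len)
--     c_bit_val = a_val >> 1
--     d_bit_val = b_val >> 1
--
--     return (a_bit_val&~b_bit_val&~c_bit_val&~d_bit_val) | \
--            (~a_bit_val&b_bit_val&~c_bit_val&~d_bit_val) | \
--            (~a_bit_val&~b_bit_val&c_bit_val&~d_bit_val) | \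
--            (~a_bit_val&~b_bit_val&~c_bit_val&d_bit_val)
--
-- def build_map(n, g_nums):
--     g_map = defaultdict(set)
--     g_set = set(g_nums)
--
--     for i in range(1<<(n+1)):
--         for j in range(1<<(n+1)):
--             bit_map = gen_bit_map(i,j,n)
--             if bit_map in g_nums:
--                 g_map[(bit_map, i)].add(j)
--     return g_map
--
-- def solution(g):
--     g = list(zip(*g))
--     n_rows = len(g)
--     n_cols = len(g[0])
--
--     g_nums = [sum([1<<i if col else 0 for i, col in enumerate(row)]) for row in g]
--     g_map = build_map(n_cols, g_nums)
--
--     pre_img = {i: 1 for i in range(1<<(n_cols+1))}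
--
--     for row in g_nums:
--         next_row = defaultdict(int)
--         for c1 in pre_img:
--             for c2 in g_map[(row, c1)]:
--                 next_row[c2] += pre_img[c1]
--         pre_img = next_row
--
--     return sum(pre_img.values())
-- ===== SOURCE B (Python) =====
-- from collections import defaultdict
--
-- def gen_bit_map(a_val, b_val, bit_len):
--     a_bit_val = a_val & ~(1 << bit_len)
--     b_bit_val = b_val & ~(1 << bit_len)
--     c_bit_val = a_val >> 1
--     d_bit_val = b_val >> 1
--     return (a_bit_val&~b_bit_val&~c_bit_val&~d_bit_val) | \
--            (~a_bit_val&b_bit_val&~c_bit_val&~d_bit_val) | \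
--            (~a_bit_val&~b_bit_val&c_bit_val&~d_bit_val) | \
--            (~a_bit_val&~b_bit_val&~c_bit_val&d_bit_val)
--
-- def solution(g):
--     g = list(zip(*g))
--     n_cols = len(g[0])
--     g_nums = [sum(1 << i if col else 0 for i, col in enumerate(row)) for row in g]
--     pre_img = {c: 1 for c in range(1 << (n_cols + 1))}
--     for t in g_nums:
--         next_row = defaultdict(int)
--         for c1, cnt in pre_img.items():
--             for c2 in range(1 << (n_cols + 1)):
--                 if gen_bit_map(c1, c2, n_cols) == t:
--                     next_row[c2] += cnt
--         pre_img = next_row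
--     return sum(pre_img.values())
-- ===== Notes on version B (the rewrite author's own statement) =====
-- stated objective: alternative
-- what changed: B deletes build_map and its precomputed (row,c1)->set transition table entirely: the DP step instead scans every candidate column c2 on the fly and adds pre_img[c1] whenever gen_bit_map(c1,c2,n_cols) equals the current target row, a single-phase inline-scan pass instead of A's index-build-then-lookup two-phase pass.
import Mathlib
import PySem

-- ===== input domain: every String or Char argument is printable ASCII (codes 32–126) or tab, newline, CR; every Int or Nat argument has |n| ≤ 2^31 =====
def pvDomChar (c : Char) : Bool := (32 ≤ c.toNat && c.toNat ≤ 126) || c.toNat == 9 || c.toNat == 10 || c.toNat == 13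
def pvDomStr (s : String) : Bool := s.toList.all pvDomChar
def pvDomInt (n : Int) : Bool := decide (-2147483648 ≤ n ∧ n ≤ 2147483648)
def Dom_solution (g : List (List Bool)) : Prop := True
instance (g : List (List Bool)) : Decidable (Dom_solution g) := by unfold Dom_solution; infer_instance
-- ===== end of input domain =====

-- B replaces A's precomputed transition table (build_map) by an inline scan of all candidate
-- columns per DP step ('alternative': different decomposition, similar cost on the task's sizes).

-- ===== PORT A =====
-- shared helper: hand port of Python's zip(*g) (tuples → lists): length = min row length,
-- entry i of output row = g[j][i]; the getD default is never used since i < every row length.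
def pyZipStar (g : List (List Bool)) : List (List Bool) :=
  match g with
  | [] => []
  | r :: rs =>
      (List.range (rs.foldl (fun m q => min m q.length) r.length)).map
        (fun i => (r :: rs).map (fun q => q.getD i false))

-- shared helper: literal port of gen_bit_map (Python & | ~ >> on ints, exact on negatives)
def genBitMap (a b : Int) (n : Nat) : Int :=
  let ab := PySem.Int.band a (Int.not ((1:Int) <<< (n:Nat)))
  let bb := PySem.Int.band b (Int.not ((1:Int) <<< (n:Nat)))
  let cb := a >>> (1:Nat)
  let db := b >>> (1:Nat)
  PySem.Int.bor (PySem.Int.bor (PySem.Int.bor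
    (PySem.Int.band (PySem.Int.band (PySem.Int.band ab (Int.not bb)) (Int.not cb)) (Int.not db))
    (PySem.Int.band (PySem.Int.band (PySem.Int.band (Int.not ab) bb) (Int.not cb)) (Int.not db)))
    (PySem.Int.band (PySem.Int.band (PySem.Int.band (Int.not ab) (Int.not bb)) cb) (Int.not db)))
    (PySem.Int.band (PySem.Int.band (PySem.Int.band (Int.not ab) (Int.not bb)) (Int.not cb)) db)

-- shared helper: sum([1<<i if col else 0 for i, col in enumerate(row)])
-- (enumerate indices are ≥ 0, so the .toNat on the shift amount is exact)
def encodeRow (row : List Bool) : Int :=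
  ((PySem.List.enumerate row).map (fun p => if p.2 then (1:Int) <<< p.1.toNat else 0)).sum

-- A's build_map; the unused locals g_set / n_rows of the Python are pure (no effect on the
-- result) and are not re-created here.
def buildMap (n : Nat) (gnums : List Int) : PySem.Dict (Int × Int) (PySem.Set Int) :=
  let R := PySem.List.pyRange 0 ((1:Int) <<< (n+1)) 1
  R.foldl (fun d i =>
    R.foldl (fun d j =>
      if genBitMap i j n ∈ gnums then
        d.modify (genBitMap i j n, i) [] (fun s => PySem.Set.add s j)
      else d) d) PySem.Dict.empty

def solution (g : List (List Bool)) : Int :=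
  let gT := pyZipStar g
  -- len(g[0]): Python raises IndexError when gT = []; excluded by Pre_solution
  let nCols := (PySem.List.pyGetD gT 0 []).length
  let gNums := gT.map encodeRow
  let gMap := buildMap nCols gNums
  let R := PySem.List.pyRange 0 ((1:Int) <<< (nCols+1)) 1
  let pre0 := R.foldl (fun d i => d.insert i (1:Int)) PySem.Dict.empty
  let fin := gNums.foldl (fun pre row =>
    pre.keys.foldl (fun nxt c1 =>
      -- 'for c2 in g_map[(row, c1)]': iterating a Python set; only the summed counts matter,
      -- so the result does not depend on that iteration order
      (PySem.Dict.getD gMap (row, c1) []).foldl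
        (fun nxt c2 => nxt.modify c2 0 (· + PySem.Dict.getD pre c1 0)) nxt)
      PySem.Dict.empty) pre0
  (PySem.Dict.values fin).sum

-- ===== PORT B =====
def solution_alt (g : List (List Bool)) : Int :=
  let gT := pyZipStar g
  let nCols := (PySem.List.pyGetD gT 0 []).length
  let gNums := gT.map encodeRow
  let R := PySem.List.pyRange 0 ((1:Int) <<< (nCols+1)) 1
  let pre0 := R.foldl (fun d c => d.insert c (1:Int)) PySem.Dict.empty
  let fin := gNums.foldl (fun pre t =>
    (PySem.Dict.items pre).foldl (fun nxt p =>
      R.foldl (fun nxt c2 =>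
        if genBitMap p.1 c2 nCols = t then nxt.modify c2 0 (· + p.2) else nxt) nxt)
      PySem.Dict.empty) pre0
  (PySem.Dict.values fin).sum

-- ===== PRECONDITION & SPEC =====
-- Pre_ excludes exactly the inputs where the Python raises IndexError on g[0] after the
-- transpose: the empty grid and grids containing an empty row (zip(*g) is then empty).
def Pre_solution (g : List (List Bool)) : Prop := g ≠ [] ∧ ∀ r ∈ g, r ≠ []
instance (g : List (List Bool)) : Decidable (Pre_solution g) := by unfold Pre_solution; infer_instance
def pvWitness_solution : List (List Bool) := [[true], [false]]

def Spec_solution (g : List (List Bool)) (out : Int) : Prop := out = solution_alt g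
instance (g : List (List Bool)) (out : Int) : Decidable (Spec_solution g out) := by unfold Spec_solution; infer_instance

-- ===== CLAIM (what is proved, stated in full; the proofs are below) =====
def Claim_equal_solution : Prop := ∀ (g : List (List Bool)), Dom_solution g → Pre_solution g → Spec_solution g (solution g)

-- ===== LEMMAS AND PROOFS =====

-- fold-preservation helper (an invariant kept by every step survives the fold)
theorem foldl_preserve {α β : Type} (P : β → Prop) (l : List α) (f : β → α → β) (b : β)
    (h0 : P b) (hs : ∀ d x, x ∈ l → P d → P (f d x)) : P (l.foldl f b) :=
  List.foldlRecOn l f h0 (fun d hd a ha => hs d a ha hd)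

theorem nodup_pyRangeN (N : Nat) : (PySem.List.pyRange 0 (N : Int) 1).Nodup := by
  rw [PySem.List.pyRange_zero_natCast]
  exact (List.nodup_range ..).map (fun a b h => by exact_mod_cast h)

-- lookup characterisation of A's build_map, inner loop
theorem buildMap_inner (n : Nat) (gnums : List Int) (i t c1 : Int)
    (js : List Int) (d : PySem.Dict (Int × Int) (PySem.Set Int)) :
    (js.foldl (fun d j =>
      if genBitMap i j n ∈ gnums then
        d.modify (genBitMap i j n, i) [] (fun s => PySem.Set.add s j)
      else d) d).getD (t, c1) [] =
    if t ∈ gnums ∧ c1 = i then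
      PySem.Set.update (d.getD (t, c1) []) (js.filter (fun j => genBitMap i j n = t))
    else d.getD (t, c1) [] := by
  induction js generalizing d with
  | nil => simp [PySem.Set.update_nil]
  | cons j js ih =>
    simp only [List.foldl_cons, List.filter_cons]
    rw [ih]
    by_cases hg : genBitMap i j n ∈ gnums
    · simp only [hg, if_pos]
      by_cases hk : (t, c1) = (genBitMap i j n, i)
      · have ht : t = genBitMap i j n := congrArg Prod.fst hk
        have hc : c1 = i := congrArg Prod.snd hk
        subst hc
        have ht' : t ∈ gnums := ht ▸ hg
        rw [PySem.Dict.getD_modify, if_pos hk]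
        have hpj : genBitMap c1 j n = t := ht.symm
        simp [ht', hpj, hk, PySem.Set.update_cons]
      · rw [PySem.Dict.getD_modify, if_neg hk]
        by_cases hb : t ∈ gnums ∧ c1 = i
        · have : ¬ genBitMap i j n = t := by
            intro he; exact hk (by simp [he, hb.2])
          simp [hb, this]
        · simp [hb]
    · simp only [hg, if_false]
      by_cases hb : t ∈ gnums ∧ c1 = i
      · have : ¬ genBitMap i j n = t := fun he => hg (he ▸ hb.1)
        simp [hb, this]
      · simp [hb]

-- lookup characterisation of A's build_map, outer loop
theorem buildMap_outer (n : Nat) (gnums : List Int) (t c1 : Int)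
    (is : List Int) (hnd : is.Nodup) (d : PySem.Dict (Int × Int) (PySem.Set Int)) :
    (is.foldl (fun d i =>
      (PySem.List.pyRange 0 ((1:Int) <<< (n+1)) 1).foldl (fun d j =>
        if genBitMap i j n ∈ gnums then
          d.modify (genBitMap i j n, i) [] (fun s => PySem.Set.add s j)
        else d) d) d).getD (t, c1) [] =
    if t ∈ gnums ∧ c1 ∈ is then
      PySem.Set.update (d.getD (t, c1) [])
        ((PySem.List.pyRange 0 ((1:Int) <<< (n+1)) 1).filter (fun j => genBitMap c1 j n = t))
    else d.getD (t, c1) [] := by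
  induction is generalizing d with
  | nil => simp
  | cons i is ih =>
    simp only [List.foldl_cons]
    have hnd' := hnd
    simp only [List.nodup_cons] at hnd'
    rw [ih hnd'.2, buildMap_inner]
    by_cases hc : c1 = i
    · subst hc
      have : c1 ∉ is := hnd'.1
      by_cases ht : t ∈ gnums <;> simp [ht, this]
    · by_cases hm : c1 ∈ is <;> by_cases ht : t ∈ gnums <;> simp [hc, hm, ht]

theorem buildMap_getD (n : Nat) (gnums : List Int) (t c1 : Int)
    (ht : t ∈ gnums) (hc : c1 ∈ PySem.List.pyRange 0 ((1:Int) <<< (n+1)) 1) :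
    (buildMap n gnums).getD (t, c1) [] =
    (PySem.List.pyRange 0 ((1:Int) <<< (n+1)) 1).filter (fun j => genBitMap c1 j n = t) := by
  have hN : ((1:Int) <<< (n+1)) = ((2 ^ (n+1) : Nat) : Int) := by
    simp [Int.shiftLeft_eq]
  have hnd : (PySem.List.pyRange 0 ((1:Int) <<< (n+1)) 1).Nodup := by
    rw [hN]; exact nodup_pyRangeN _
  unfold buildMap
  rw [buildMap_outer n gnums t c1 _ hnd]
  simp only [ht, hc, and_self, if_pos, PySem.Dict.getD_empty]
  rw [PySem.Set.update_nil_left, PySem.Set.ofList_eq_self_of_nodup _ (hnd.filter _)]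

-- the DP invariant: keys are distinct and lie in the candidate range
def DPInv (N : Nat) (d : PySem.Dict Int Int) : Prop :=
  d.keys.Nodup ∧ ∀ k ∈ d.keys, k ∈ PySem.List.pyRange 0 ((N : Nat) : Int) 1

theorem DPInv_modify (N : Nat) (d : PySem.Dict Int Int) (c2 : Int) (f : Int → Int)
    (hc : c2 ∈ PySem.List.pyRange 0 ((N : Nat) : Int) 1) (h : DPInv N d) :
    DPInv N (d.modify c2 0 f) := by
  obtain ⟨h1, h2⟩ := h
  constructor
  · rw [PySem.Dict.keys_modify]
    by_cases hk : d.contains c2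
    · rw [PySem.Dict.keys_insert_of_contains _ _ hk]; exact h1
    · rw [PySem.Dict.keys_insert_of_not_contains _ _ (by simpa using hk)]
      simp only [List.nodup_append, List.nodup_cons]
      refine ⟨h1, by simp, ?_⟩
      intro a ha b hb
      simp only [List.mem_singleton] at hb
      subst hb
      exact fun hab => hk ((PySem.Dict.contains_iff_mem_keys ..).mpr (hab ▸ ha))
  · intro k hk
    rw [PySem.Dict.keys_modify, PySem.Dict.mem_keys_insert] at hk
    rcases hk with rfl | hk
    · exact hc
    · exact h2 k hk

-- B's row step keeps the invariant
theorem DPInv_stepB (N : Nat) (pre : PySem.Dict Int Int) (t : Int) (n : Nat)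
    (hR : PySem.List.pyRange 0 ((1:Int) <<< (n+1)) 1 = PySem.List.pyRange 0 ((N : Nat) : Int) 1) :
    DPInv N ((PySem.Dict.items pre).foldl (fun nxt p =>
      (PySem.List.pyRange 0 ((1:Int) <<< (n+1)) 1).foldl (fun nxt c2 =>
        if genBitMap p.1 c2 n = t then nxt.modify c2 0 (· + p.2) else nxt) nxt)
      PySem.Dict.empty) := by
  apply foldl_preserve (DPInv N)
  · exact ⟨by simp, by simp⟩
  · intro d p _ hd
    apply foldl_preserve (DPInv N)
    · exact hd
    · intro d' c2 hc2 hd'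
      split_ifs
      · exact DPInv_modify N d' c2 _ (hR ▸ hc2) hd'
      · exact hd'

-- the two row steps agree on any dict satisfying the invariant
theorem step_eq (n N : Nat) (gnums : List Int) (t : Int) (ht : t ∈ gnums)
    (pre : PySem.Dict Int Int) (hinv : DPInv N pre)
    (hR : PySem.List.pyRange 0 ((1:Int) <<< (n+1)) 1 = PySem.List.pyRange 0 ((N : Nat) : Int) 1) :
    pre.keys.foldl (fun nxt c1 =>
      (PySem.Dict.getD (buildMap n gnums) (t, c1) []).foldl
        (fun nxt c2 => nxt.modify c2 0 (· + PySem.Dict.getD pre c1 0)) nxt)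
      PySem.Dict.empty =
    (PySem.Dict.items pre).foldl (fun nxt p =>
      (PySem.List.pyRange 0 ((1:Int) <<< (n+1)) 1).foldl (fun nxt c2 =>
        if genBitMap p.1 c2 n = t then nxt.modify c2 0 (· + p.2) else nxt) nxt)
      PySem.Dict.empty := by
  rw [PySem.Dict.items_eq_map_keys pre hinv.1 0, List.foldl_map]
  apply PySem.List.foldl_congr_mem
  intro acc c1 hc1
  rw [buildMap_getD n gnums t c1 ht (hR ▸ hinv.2 c1 hc1), List.foldl_filter]
  apply PySem.List.foldl_congr_mem
  intro acc' c2 _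
  simp

theorem solution_eq (g : List (List Bool)) (_hpre : Pre_solution g) :
    solution g = solution_alt g := by
  unfold solution solution_alt
  dsimp only []
  set gT := pyZipStar g with hgT
  set nCols := (PySem.List.pyGetD gT 0 []).length with hn
  set gNums := gT.map encodeRow with hg
  set R := PySem.List.pyRange 0 ((1:Int) <<< (nCols+1)) 1 with hRdef
  set pre0 := R.foldl (fun d i => d.insert i (1:Int)) PySem.Dict.empty with hp0
  have hN : ((1:Int) <<< (nCols+1)) = ((2 ^ (nCols+1) : Nat) : Int) := by
    simp [Int.shiftLeft_eq]
  have hR : R = PySem.List.pyRange 0 (((2 ^ (nCols+1) : Nat) : Nat) : Int) 1 := by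
    rw [hRdef, hN]
  have hinv0 : DPInv (2 ^ (nCols+1)) pre0 := by
    constructor
    · rw [hp0, PySem.Dict.keys_foldl_insert (f := fun _ _ => (1:Int))]
      simp only [PySem.Dict.keys_empty, PySem.Set.update_nil_left]
      exact PySem.Set.nodup_ofList R
    · intro k hk
      rw [hp0, PySem.Dict.keys_foldl_insert (f := fun _ _ => (1:Int))] at hk
      simp only [PySem.Dict.keys_empty, PySem.Set.update_nil_left] at hk
      rw [← hR]
      exact (PySem.Set.mem_ofList ..).mp hk
  -- fold the DP over any sublist of gNums, carrying the invariant
  suffices h : ∀ (rows : List Int), (∀ r ∈ rows, r ∈ gNums) →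
      ∀ (pre : PySem.Dict Int Int), DPInv (2 ^ (nCols+1)) pre →
      rows.foldl (fun pre row =>
        pre.keys.foldl (fun nxt c1 =>
          (PySem.Dict.getD (buildMap nCols gNums) (row, c1) []).foldl
            (fun nxt c2 => nxt.modify c2 0 (· + PySem.Dict.getD pre c1 0)) nxt)
          PySem.Dict.empty) pre =
      rows.foldl (fun pre t =>
        (PySem.Dict.items pre).foldl (fun nxt p =>
          R.foldl (fun nxt c2 =>
            if genBitMap p.1 c2 nCols = t then nxt.modify c2 0 (· + p.2) else nxt) nxt)
          PySem.Dict.empty) pre by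
    rw [h gNums (fun r hr => hr) pre0 hinv0]
  intro rows hrows
  induction rows with
  | nil => intro pre _; rfl
  | cons r rows ih =>
    intro pre hinv
    simp only [List.foldl_cons]
    rw [step_eq nCols (2 ^ (nCols+1)) gNums r (hrows r (by simp)) pre hinv (hR ▸ hRdef ▸ rfl)]
    exact ih (fun x hx => hrows x (by simp [hx]))
      _ (DPInv_stepB (2 ^ (nCols+1)) pre r nCols (hR ▸ hRdef ▸ rfl))

-- ===== VERDICT (by name: the statement is the Claim_ definition above) =====
theorem solution_spec : Claim_equal_solution := by
  intro g _ hpre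
  unfold Spec_solution
  exact solution_eq g hpre
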